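-- pv_equiv track=rewrite | github.com/ggarredondo/foo.bar-challenge-2 | solution.py | lambda_algorithm
-- ===== SOURCE A (Python) =====
-- def decimal_to_base(n, b):
--     if b == 10 or n == 0:
--         return str(n)
--     digits = ''
--     while n:
--         digits += str(n % b)
--         n //= b
--     return digits[::-1]
--
-- def lambda_algorithm(n, b):
--     k = len(n)
--     string = ''.join(sorted(n))
--     x = int(string[::-1], b)
--     y = int(string, b)
--     z = abs(x - y)
--     n = decimal_to_base(z, b)
--     while len(n) < k:
--         n = '0' + n
--     return n
-- ===== SOURCE B (Python) =====
-- # Same one-step digit-sort subtraction, but without big integers: after one sort,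
-- # the difference (descending arrangement minus ascending arrangement) is computed
-- # digit-by-digit in base b by schoolbook borrow subtraction, and rendered
-- # least-significant-first then reversed, as usual for base conversion.
-- def lambda_algorithm(n, b):
--     k = len(n)
--     asc = [int(c, b) for c in sorted(n)]  # digit values, smallest first
--     digits = []  # digits of the difference, least-significant first
--     borrow = 0
--     for hi, lo in zip(asc, reversed(asc)):
--         d = hi - lo - borrow
--         if d < 0:
--             d += b
--             borrow = 1
--         else:
--             borrow = 0
--         digits.append(d)
--     while digits and digits[-1] == 0:  # drop leading zeros of the number
--         digits.pop()
--     out = ''.join(str(d) for d in digits)[::-1]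
--     return '0' * (k - len(out)) + out
-- ===== Notes on version B (the rewrite author's own statement) =====
-- stated objective: alternative
-- what changed: Instead of parsing the two digit arrangements into big integers, subtracting and re-converting with repeated divmod, B sorts once and performs base-b schoolbook borrow subtraction digit-by-digit (descending minus ascending), never forming a multi-digit integer.
-- outside the precondition, e.g. on lambda_algorithm(' 12', 10): A returns '009', B raises ValueError; on lambda_algorithm('5_a', 16): A returns '411', B raises ValueError; on lambda_algorithm('aB', 36): A returns '53', B returns '531'
import Mathlib
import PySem

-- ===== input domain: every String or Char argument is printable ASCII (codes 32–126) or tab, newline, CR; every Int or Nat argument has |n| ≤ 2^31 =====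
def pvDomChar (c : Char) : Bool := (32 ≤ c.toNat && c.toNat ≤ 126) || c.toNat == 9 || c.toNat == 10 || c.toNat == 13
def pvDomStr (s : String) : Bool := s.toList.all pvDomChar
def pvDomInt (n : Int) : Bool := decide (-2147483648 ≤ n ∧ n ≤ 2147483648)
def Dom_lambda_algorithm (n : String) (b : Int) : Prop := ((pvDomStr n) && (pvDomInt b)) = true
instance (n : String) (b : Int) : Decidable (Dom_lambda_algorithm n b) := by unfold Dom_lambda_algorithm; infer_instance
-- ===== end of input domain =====

-- B replaces A's big-integer parse/subtract/reconvert by one sort plus per-digit base-b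
-- schoolbook borrow subtraction; equal return value on Pre_ (see Pre_ for exclusions).


-- ===== PORT A =====

-- int(c, b)'s recognition of one digit character (0-9, a-z, A-Z below the base).
-- Hand-ported (PySem.Int.ofCharsBase? covers the full int() grammar, but its internals are
-- private and unusable in proofs); exact on single digit characters and bad bases.
def pvDigit? (c : Char) (b : Int) : Option Int :=
  if 2 ≤ b ∧ b ≤ 36 then
    if 48 ≤ c.toNat ∧ c.toNat ≤ 57 then
      (if ((c.toNat : Int) - 48) < b then some ((c.toNat : Int) - 48) else none)
    else if 97 ≤ c.toNat ∧ c.toNat ≤ 122 then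
      (if ((c.toNat : Int) - 87) < b then some ((c.toNat : Int) - 87) else none)
    else if 65 ≤ c.toNat ∧ c.toNat ≤ 90 then
      (if ((c.toNat : Int) - 55) < b then some ((c.toNat : Int) - 55) else none)
    else none
  else none

def pvParseStep (b : Int) (acc : Option Int) (c : Char) : Option Int :=
  match acc, pvDigit? c b with
  | some a, some v => some (a * b + v)
  | _, _ => none

-- int(''.join cs, b); hand-ported, exact on nonempty plain base-b digit strings (the Pre_
-- domain); int()'s sign/whitespace/underscore/prefix syntax lies outside Pre_.
def pvParse? (cs : List Char) (b : Int) : Option Int :=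
  if cs = [] then none else cs.foldl (pvParseStep b) (some 0)

-- 'while n: digits += str(n % b); n //= b' (fuel makes the loop total; z.toNat+1 steps always suffice on Pre_)
def pvD2bLoop : Nat → Int → Int → List Char → List Char
  | 0, _, _, acc => acc
  | f + 1, z, b, acc =>
      if z = 0 then acc
      else pvD2bLoop f (PySem.Int.floordiv z b) b (acc ++ PySem.Int.toChars (PySem.Int.mod z b))

def pvDecimalToBase (z b : Int) : List Char :=
  if b = 10 ∨ z = 0 then PySem.Int.toChars z
  else (pvD2bLoop (z.toNat + 1) z b []).reverse

-- 'while len(n) < k: n = "0" + n' (fuel k suffices: each step grows the list by one)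
def pvPadLoop : Nat → Nat → List Char → List Char
  | 0, _, cs => cs
  | f + 1, k, cs => if cs.length < k then pvPadLoop f k ('0' :: cs) else cs

def lambda_algorithm (n : String) (b : Int) : String :=
  match pvParse? (PySem.List.sorted n.toList (fun c => c) false).reverse b,
        pvParse? (PySem.List.sorted n.toList (fun c => c) false) b with
  | some x, some y =>
      String.ofList (pvPadLoop n.toList.length n.toList.length (pvDecimalToBase |x - y| b))
  | _, _ => ""   -- int() raises ValueError here: outside Pre_

-- ===== PORT B =====

-- [int(c, b) for c in …]: all-or-nothing (a failing int() raises out of the comprehension)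
def pvSeq? : List (Option Int) → Option (List Int)
  | [] => some []
  | none :: _ => none
  | some v :: rest => (pvSeq? rest).map (v :: ·)

-- B's borrow-subtraction loop, least-significant digit pair first
def pvSubLoop : List (Int × Int) → Int → Int → List Int → List Int
  | [], _, _, digits => digits
  | (hi, lo) :: rest, b, borrow, digits =>
      if hi - lo - borrow < 0 then pvSubLoop rest b 1 (digits ++ [hi - lo - borrow + b])
      else pvSubLoop rest b 0 (digits ++ [hi - lo - borrow])

-- 'while digits and digits[-1] == 0: digits.pop()'
def pvStripTrailing : List Int → List Int
  | [] => []
  | d :: rest =>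
      match pvStripTrailing rest with
      | [] => if d = 0 then [] else [d]
      | r => d :: r

def lambda_algorithm_alt (n : String) (b : Int) : String :=
  match pvSeq? ((PySem.List.sorted n.toList (fun c => c) false).map (fun c => pvDigit? c b)) with
  | none => ""   -- int(c, b) raises ValueError: outside Pre_
  | some asc =>
      let out := (((pvStripTrailing (pvSubLoop (asc.zip asc.reverse) b 0 [])).map
                     PySem.Int.toChars).flatten).reverse
      String.ofList (List.replicate (n.toList.length - out.length) '0' ++ out)

-- ===== PRECONDITION & SPEC =====

def pvAllowed (c : Char) (b : Int) : Bool :=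
  (48 ≤ c.toNat && c.toNat ≤ 57 && decide ((c.toNat : Int) - 48 < b)) ||
  (97 ≤ c.toNat && c.toNat ≤ 122 && decide ((c.toNat : Int) - 87 < b)) ||
  (65 ≤ c.toNat && c.toNat ≤ 90 && decide ((c.toNat : Int) - 55 < b))

-- Pre_ excludes inputs where int() raises (empty string, base outside 2..36, characters that
-- are not base-b digits) and two defensible corners on which A still returns: strings whose
-- sign/space/underscore characters int() accepts only because of where the sort happens to
-- put them, and strings mixing upper- and lower-case letters, where the case-sensitive
-- character sort need not order the case-insensitive digit values, so which arrangement A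
-- subtracts is an accident of character codes.
def Pre_lambda_algorithm (n : String) (b : Int) : Prop :=
  n.toList ≠ [] ∧ 2 ≤ b ∧ b ≤ 36 ∧ (n.toList.all (fun c => pvAllowed c b)) = true ∧
  ((n.toList.all (fun c => decide (c.toNat < 97))) = true ∨
   (n.toList.all (fun c => decide (c.toNat < 65 ∨ 90 < c.toNat))) = true)

instance (n : String) (b : Int) : Decidable (Pre_lambda_algorithm n b) := by
  unfold Pre_lambda_algorithm; infer_instance

def pvWitness_lambda_algorithm : String × Int := ("210", 3)

def Spec_lambda_algorithm (n : String) (b : Int) (out : String) : Prop := out = lambda_algorithm_alt n b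
instance (n : String) (b : Int) (out : String) : Decidable (Spec_lambda_algorithm n b out) := by
  unfold Spec_lambda_algorithm; infer_instance

-- ===== CLAIM (what is proved, stated in full; the proofs are below) =====
def Claim_equal_lambda_algorithm : Prop := ∀ (n : String) (b : Int), Dom_lambda_algorithm n b → Pre_lambda_algorithm n b → Spec_lambda_algorithm n b (lambda_algorithm n b)

-- ===== LEMMAS AND PROOFS =====

-- digit value of an admitted character
def pvDV (c : Char) : Int :=
  if c.toNat ≤ 57 then (c.toNat : Int) - 48
  else if c.toNat ≤ 90 then (c.toNat : Int) - 55
  else (c.toNat : Int) - 87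

-- value of a most-significant-first digit list, starting from accumulator a
def pvVM (b : Int) (l : List Int) (a : Int) : Int := l.foldl (fun acc d => acc * b + d) a

-- value of a least-significant-first digit list
def pvVL (b : Int) : List Int → Int
  | [] => 0
  | d :: r => d + b * pvVL b r

-- base-b digits of z, least significant first, via repeated divmod (fuel-bounded)
def pvDig (b : Int) : Nat → Int → List Int
  | 0, _ => []
  | f + 1, z => if z = 0 then [] else PySem.Int.mod z b :: pvDig b f (PySem.Int.floordiv z b)

theorem pv_char_le {c d : Char} (h : c ≤ d) : c.toNat ≤ d.toNat := by
  rw [Char.le_def] at h; exact UInt32.le_iff_toNat_le.mp h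

theorem pv_digit_eq {c : Char} {b : Int} (hb2 : 2 ≤ b) (hb36 : b ≤ 36)
    (h : pvAllowed c b = true) : pvDigit? c b = some (pvDV c) := by
  simp only [pvAllowed, Bool.or_eq_true, Bool.and_eq_true, decide_eq_true_eq] at h
  unfold pvDigit? pvDV
  rw [if_pos ⟨hb2, hb36⟩]
  split_ifs <;> first | rfl | omega

theorem pv_dv_bounds {c : Char} {b : Int} (h : pvAllowed c b = true) :
    0 ≤ pvDV c ∧ pvDV c < b := by
  simp only [pvAllowed, Bool.or_eq_true, Bool.and_eq_true, decide_eq_true_eq] at h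
  unfold pvDV
  split_ifs <;> omega

theorem pv_dv_mono {c d : Char} {b : Int} (hc : pvAllowed c b = true)
    (hd : pvAllowed d b = true)
    (hcase : (c.toNat < 97 ∧ d.toNat < 97) ∨
             ((c.toNat < 65 ∨ 90 < c.toNat) ∧ (d.toNat < 65 ∨ 90 < d.toNat)))
    (h : c.toNat ≤ d.toNat) : pvDV c ≤ pvDV d := by
  simp only [pvAllowed, Bool.or_eq_true, Bool.and_eq_true, decide_eq_true_eq] at hc hd
  unfold pvDV
  split_ifs <;> omega

theorem pv_foldl_parse (b : Int) : ∀ (l : List Char) (a : Int),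
    (∀ c ∈ l, pvDigit? c b = some (pvDV c)) →
    l.foldl (pvParseStep b) (some a) = some (pvVM b (l.map pvDV) a) := by
  intro l
  induction l with
  | nil => intro a _; simp [pvVM]
  | cons c t ih =>
      intro a h
      have hc := h c (by simp)
      have hstep : pvParseStep b (some a) c = some (a * b + pvDV c) := by
        simp [pvParseStep, hc]
      simp only [List.foldl_cons, hstep]
      rw [ih (a * b + pvDV c) (fun x hx => h x (by simp [hx]))]
      rfl

theorem pv_parse_eq {b : Int} {l : List Char} (hne : l ≠ [])
    (hall : ∀ c ∈ l, pvDigit? c b = some (pvDV c)) :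
    pvParse? l b = some (pvVM b (l.map pvDV) 0) := by
  simp only [pvParse?, if_neg hne]
  exact pv_foldl_parse b l 0 hall

theorem pv_vM_cons (b d : Int) (t : List Int) (a : Int) :
    pvVM b (d :: t) a = pvVM b t (a * b + d) := rfl

theorem pv_vM_shift (b : Int) : ∀ (l : List Int) (a : Int),
    pvVM b l a = a * b ^ l.length + pvVM b l 0 := by
  intro l
  induction l with
  | nil => intro a; simp [pvVM]
  | cons d t ih =>
      intro a
      rw [pv_vM_cons, pv_vM_cons, ih (a * b + d), ih (0 * b + d)]
      simp only [List.length_cons]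
      rw [pow_succ]
      ring

theorem pv_vL_append (b : Int) : ∀ (l : List Int) (d : Int),
    pvVL b (l ++ [d]) = pvVL b l + d * b ^ l.length := by
  intro l
  induction l with
  | nil => intro d; simp [pvVL]
  | cons e t ih =>
      intro d
      simp only [List.cons_append, pvVL, ih d, List.length_cons]
      rw [pow_succ]
      ring

theorem pv_vM_eq_vL (b : Int) : ∀ l : List Int, pvVM b l 0 = pvVL b l.reverse := by
  intro l
  induction l with
  | nil => simp [pvVM, pvVL]
  | cons d t ih =>
      rw [pv_vM_cons, pv_vM_shift, ih]
      simp only [List.reverse_cons, pv_vL_append, List.length_reverse]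
      ring

theorem pv_vL_bounds {b : Int} (hb : 0 < b) : ∀ l : List Int,
    (∀ d ∈ l, 0 ≤ d ∧ d < b) → 0 ≤ pvVL b l ∧ pvVL b l < b ^ l.length := by
  intro l
  induction l with
  | nil => intro _; simp [pvVL]
  | cons d t ih =>
      intro h
      obtain ⟨hd0, hdb⟩ := h d (by simp)
      obtain ⟨hV0, hVb⟩ := ih (fun x hx => h x (by simp [hx]))
      constructor
      · have := mul_nonneg (le_of_lt hb) hV0
        simp only [pvVL]; omega
      · simp only [pvVL, List.length_cons]
        rw [pow_succ]
        nlinarith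

theorem pv_vL_ge_head {b : Int} (hb : 1 ≤ b) (a : Int) (_ha : 0 ≤ a) :
    ∀ t : List Int, (∀ d ∈ t, a ≤ d) → a * (b ^ t.length - 1) ≤ (b - 1) * pvVL b t := by
  intro t
  induction t with
  | nil => simp [pvVL]
  | cons c t' ih =>
      intro h
      have hc := h c (by simp)
      have iht := ih (fun x hx => h x (by simp [hx]))
      simp only [pvVL, List.length_cons]
      rw [pow_succ]
      nlinarith

theorem pv_rev_le {b : Int} (hb : 1 ≤ b) : ∀ l : List Int,
    l.Pairwise (· ≤ ·) → (∀ d ∈ l, 0 ≤ d) → pvVL b l.reverse ≤ pvVL b l := by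
  intro l
  induction l with
  | nil => simp
  | cons a t ih =>
      intro hp h0
      have ha0 : 0 ≤ a := h0 a (by simp)
      have hat : ∀ d ∈ t, a ≤ d := (List.pairwise_cons.mp hp).1
      have iht := ih (List.pairwise_cons.mp hp).2 (fun x hx => h0 x (by simp [hx]))
      have hF := pv_vL_ge_head hb a ha0 t hat
      simp only [List.reverse_cons, pv_vL_append, List.length_reverse, pvVL]
      nlinarith

-- spec-side form of B's subtraction loop, carrying the final borrow
def pvSubSpec (b : Int) : List (Int × Int) → Int → List Int × Int
  | [], br => ([], br)
  | (hi, lo) :: rest, br =>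
      if hi - lo - br < 0 then
        ((hi - lo - br + b) :: (pvSubSpec b rest 1).1, (pvSubSpec b rest 1).2)
      else
        ((hi - lo - br) :: (pvSubSpec b rest 0).1, (pvSubSpec b rest 0).2)

theorem pv_subloop_acc (b : Int) : ∀ (ps : List (Int × Int)) (br : Int) (acc : List Int),
    pvSubLoop ps b br acc = acc ++ pvSubLoop ps b br [] := by
  intro ps
  induction ps with
  | nil => intro br acc; simp [pvSubLoop]
  | cons p rest ih =>
      intro br acc
      obtain ⟨hi, lo⟩ := p
      simp only [pvSubLoop]
      split_ifs with h
      · rw [ih 1 (acc ++ [hi - lo - br + b]), ih 1 ([] ++ [hi - lo - br + b])]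
        simp
      · rw [ih 0 (acc ++ [hi - lo - br]), ih 0 ([] ++ [hi - lo - br])]
        simp

theorem pv_subloop_eq_spec (b : Int) : ∀ (ps : List (Int × Int)) (br : Int),
    pvSubLoop ps b br [] = (pvSubSpec b ps br).1 := by
  intro ps
  induction ps with
  | nil => intro br; simp [pvSubLoop, pvSubSpec]
  | cons p rest ih =>
      intro br
      obtain ⟨hi, lo⟩ := p
      simp only [pvSubLoop, pvSubSpec]
      split_ifs with h
      · rw [pv_subloop_acc b rest 1 ([] ++ [hi - lo - br + b])]
        simp [ih 1]
      · rw [pv_subloop_acc b rest 0 ([] ++ [hi - lo - br])]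
        simp [ih 0]

theorem pv_subspec_spec {b : Int} (_hb : 0 < b) : ∀ (ps : List (Int × Int)) (br : Int),
    0 ≤ br → br ≤ 1 →
    (∀ p ∈ ps, (0 ≤ p.1 ∧ p.1 < b) ∧ (0 ≤ p.2 ∧ p.2 < b)) →
    (pvSubSpec b ps br).1.length = ps.length ∧
    (∀ d ∈ (pvSubSpec b ps br).1, 0 ≤ d ∧ d < b) ∧
    (0 ≤ (pvSubSpec b ps br).2 ∧ (pvSubSpec b ps br).2 ≤ 1) ∧
    pvVL b (pvSubSpec b ps br).1 =
      pvVL b (ps.map Prod.fst) - pvVL b (ps.map Prod.snd) - br +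
        (pvSubSpec b ps br).2 * b ^ ps.length := by
  intro ps
  induction ps with
  | nil => intro br h0 h1 _; simp [pvSubSpec, pvVL]; omega
  | cons p rest ih =>
      intro br h0 h1 hps
      obtain ⟨hi, lo⟩ := p
      obtain ⟨⟨hhi0, hhib⟩, ⟨hlo0, hlob⟩⟩ := hps (hi, lo) (by simp)
      have hrest : ∀ p ∈ rest, (0 ≤ p.1 ∧ p.1 < b) ∧ (0 ≤ p.2 ∧ p.2 < b) :=
        fun x hx => hps x (by simp [hx])
      simp only [pvSubSpec]
      split_ifs with h
      · obtain ⟨ihlen, ihbd, ihbr, ihval⟩ := ih 1 (by omega) (by omega) hrest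
        refine ⟨by simp [ihlen], ?_, ihbr, ?_⟩
        · intro d hd
          rcases List.mem_cons.mp hd with h' | h'
          · omega
          · exact ihbd d h'
        · simp only [pvVL, List.map_cons, List.length_cons, ihval]
          rw [pow_succ]
          ring
      · obtain ⟨ihlen, ihbd, ihbr, ihval⟩ := ih 0 (by omega) (by omega) hrest
        refine ⟨by simp [ihlen], ?_, ihbr, ?_⟩
        · intro d hd
          rcases List.mem_cons.mp hd with h' | h'
          · omega
          · exact ihbd d h'
        · simp only [pvVL, List.map_cons, List.length_cons, ihval]
          rw [pow_succ]
          ring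

theorem pv_mod_eq {z b : Int} (hb : 0 < b) : PySem.Int.mod z b = z % b := by
  simp [pysem, hb]

theorem pv_floordiv_eq {z b : Int} (hb : 0 < b) : PySem.Int.floordiv z b = z / b := by
  simp [pysem, hb]

theorem pv_div_lt {z b : Int} (hz : 0 < z) (hb : 2 ≤ b) : z / b < z := by
  rw [Int.ediv_lt_iff_lt_mul (by omega)]
  nlinarith

theorem pv_dig_zero (b : Int) (f : Nat) : pvDig b f 0 = [] := by
  cases f <;> simp [pvDig]

theorem pv_dig_spec {b : Int} (hb : 2 ≤ b) : ∀ (f : Nat) (z : Int), 0 ≤ z → z.toNat < f →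
    pvVL b (pvDig b f z) = z ∧ (∀ d ∈ pvDig b f z, 0 ≤ d ∧ d < b) ∧
    (z ≠ 0 → pvDig b f z ≠ []) := by
  intro f
  induction f with
  | zero => intro z h0 hf; omega
  | succ f ih =>
      intro z h0 hf
      by_cases hz : z = 0
      · subst hz; simp [pvDig, pvVL]
      · have hzpos : 0 < z := by omega
        have hdiv : 0 ≤ z / b := Int.ediv_nonneg h0 (by omega)
        have hlt : z / b < z := pv_div_lt hzpos hb
        have hfd : (z / b).toNat < f := by omega
        obtain ⟨ihv, ihb, _⟩ := ih (z / b) hdiv hfd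
        have hmod0 : 0 ≤ z % b := Int.emod_nonneg z (by omega)
        have hmodb : z % b < b := Int.emod_lt_of_pos z (by omega)
        simp only [pvDig, if_neg hz, pv_mod_eq (by omega : (0:Int) < b),
          pv_floordiv_eq (by omega : (0:Int) < b)]
        refine ⟨?_, ?_, by simp⟩
        · simp only [pvVL, ihv]
          exact Int.emod_add_mul_ediv z b
        · intro d hd
          rcases List.mem_cons.mp hd with h' | h'
          · omega
          · exact ihb d h'

theorem pv_dig_stripped {b : Int} (hb : 2 ≤ b) : ∀ (f : Nat) (z : Int), 0 < z → z.toNat < f →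
    pvStripTrailing (pvDig b f z) = pvDig b f z := by
  intro f
  induction f with
  | zero => intro z h0 hf; omega
  | succ f ih =>
      intro z h0 hf
      have hz : z ≠ 0 := by omega
      have hdiv : 0 ≤ z / b := Int.ediv_nonneg (by omega) (by omega)
      have hlt : z / b < z := pv_div_lt h0 hb
      have hfd : (z / b).toNat < f := by omega
      simp only [pvDig, if_neg hz, pv_mod_eq (by omega : (0:Int) < b),
        pv_floordiv_eq (by omega : (0:Int) < b)]
      by_cases hq : z / b = 0
      · have hzb : z % b = z := by
          have h3 := Int.emod_add_mul_ediv z b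
          rw [hq, mul_zero] at h3
          omega
        rw [hq, pv_dig_zero]
        simp only [pvStripTrailing]
        rw [if_neg (by omega)]
      · have hqpos : 0 < z / b := by omega
        have ihr := ih (z / b) hqpos hfd
        have hne : pvDig b f (z / b) ≠ [] :=
          (pv_dig_spec hb f (z / b) hdiv hfd).2.2 (by omega)
        obtain ⟨hd, tl, heq⟩ := List.exists_cons_of_ne_nil hne
        rw [show pvStripTrailing (z % b :: pvDig b f (z / b)) =
              (match pvStripTrailing (pvDig b f (z / b)) with
               | [] => if z % b = 0 then [] else [z % b]
               | r => z % b :: r) from rfl, ihr, heq]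

theorem pv_strip_zero {b : Int} (hb : 0 < b) : ∀ l : List Int,
    (∀ d ∈ l, 0 ≤ d ∧ d < b) → pvVL b l = 0 → pvStripTrailing l = [] := by
  intro l
  induction l with
  | nil => intro _ _; rfl
  | cons d r ih =>
      intro hbd hv
      obtain ⟨hd0, hdb⟩ := hbd d (by simp)
      have hr := pv_vL_bounds hb r (fun x hx => hbd x (by simp [hx]))
      have hbV : 0 ≤ b * pvVL b r := mul_nonneg (le_of_lt hb) hr.1
      simp only [pvVL] at hv
      have hd : d = 0 := by omega
      have hV : pvVL b r = 0 := by
        have : b * pvVL b r = 0 := by omega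
        rcases mul_eq_zero.mp this with h | h
        · omega
        · exact h
      rw [pvStripTrailing, ih (fun x hx => hbd x (by simp [hx])) hV]
      simp [hd]

theorem pv_strip_unique {b : Int} (hb : 0 < b) : ∀ (u v : List Int),
    (∀ d ∈ u, 0 ≤ d ∧ d < b) → (∀ d ∈ v, 0 ≤ d ∧ d < b) →
    pvVL b u = pvVL b v → pvStripTrailing u = pvStripTrailing v := by
  intro u
  induction u with
  | nil =>
      intro v _ hv heq
      rw [pv_strip_zero hb v hv (by simpa [pvVL] using heq.symm)]
      rfl
  | cons d u' ih =>
      intro v hu hv heq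
      cases v with
      | nil =>
          rw [pv_strip_zero hb (d :: u') hu (by simpa [pvVL] using heq)]
          rfl
      | cons e v' =>
          obtain ⟨hd0, hdb⟩ := hu d (by simp)
          obtain ⟨he0, heb⟩ := hv e (by simp)
          have hu' := pv_vL_bounds hb u' (fun x hx => hu x (by simp [hx]))
          have hv' := pv_vL_bounds hb v' (fun x hx => hv x (by simp [hx]))
          simp only [pvVL] at heq
          have hUV : pvVL b u' = pvVL b v' := by
            rcases lt_trichotomy (pvVL b u') (pvVL b v') with h | h | h
            · exfalso
              have hm := mul_le_mul_of_nonneg_left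
                (show pvVL b u' + 1 ≤ pvVL b v' by omega) (show (0:Int) ≤ b by omega)
              rw [mul_add, mul_one] at hm
              linarith
            · exact h
            · exfalso
              have hm := mul_le_mul_of_nonneg_left
                (show pvVL b v' + 1 ≤ pvVL b u' by omega) (show (0:Int) ≤ b by omega)
              rw [mul_add, mul_one] at hm
              linarith
          have hd : d = e := by
            have hbe : b * pvVL b u' = b * pvVL b v' := by rw [hUV]
            linarith
          have ihr := ih v' (fun x hx => hu x (by simp [hx]))
            (fun x hx => hv x (by simp [hx])) hUV
          subst hd
          simp only [pvStripTrailing, ihr]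

theorem pv_d2b_flatten (b : Int) : ∀ (f : Nat) (z : Int) (acc : List Char),
    pvD2bLoop f z b acc = acc ++ ((pvDig b f z).map PySem.Int.toChars).flatten := by
  intro f
  induction f with
  | zero => intro z acc; simp [pvD2bLoop, pvDig]
  | succ f ih =>
      intro z acc
      by_cases hz : z = 0
      · simp [pvD2bLoop, pvDig, hz]
      · simp only [pvD2bLoop, pvDig, if_neg hz]
        rw [ih]
        simp [List.append_assoc]

theorem pv_pad_eq : ∀ (f k : Nat) (cs : List Char), k - cs.length ≤ f →
    pvPadLoop f k cs = List.replicate (k - cs.length) '0' ++ cs := by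
  intro f
  induction f with
  | zero =>
      intro k cs h
      have : k - cs.length = 0 := by omega
      simp [pvPadLoop, this]
  | succ f ih =>
      intro k cs h
      by_cases hlt : cs.length < k
      · simp only [pvPadLoop, if_pos hlt]
        rw [ih k ('0' :: cs) (by simp; omega)]
        have hk : k - cs.length = (k - ('0' :: cs).length) + 1 := by simp; omega
        rw [hk, List.replicate_succ']
        simp
      · simp only [pvPadLoop, if_neg hlt]
        have : k - cs.length = 0 := by omega
        simp [this]

theorem pv_toChars_nonneg {z : Int} (hz : 0 ≤ z) :
    PySem.Int.toChars z = Nat.toDigits 10 z.toNat := by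
  simp [PySem.Int.toChars]
  omega

theorem pv_toChars_digit {d : Int} (h0 : 0 ≤ d) (h10 : d < 10) :
    PySem.Int.toChars d = [Nat.digitChar d.toNat] := by
  rw [pv_toChars_nonneg h0]
  have h : d.toNat < 10 := by omega
  simp [Nat.toDigits, Nat.toDigitsCore, Nat.div_eq_of_lt h, Nat.mod_eq_of_lt h]

theorem pv_toDigitsCore_eq : ∀ (g : Nat) (z : Int) (f : Nat) (acc : List Char),
    0 < z → z.toNat < 10 ^ g → z.toNat < f →
    Nat.toDigitsCore 10 g z.toNat acc =
      ((pvDig 10 f z).map (fun d => Nat.digitChar d.toNat)).reverse ++ acc := by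
  intro g
  induction g with
  | zero => intro z f acc h0 hg hf; simp at hg; omega
  | succ g ih =>
      intro z f acc h0 hg hf
      cases f with
      | zero => omega
      | succ f =>
          have hz : z ≠ 0 := by omega
          have hmod : (z % 10).toNat = z.toNat % 10 := by omega
          have hdiv : (z / 10).toNat = z.toNat / 10 := by omega
          simp only [pvDig, if_neg hz, pv_mod_eq (by norm_num : (0:Int) < 10),
            pv_floordiv_eq (by norm_num : (0:Int) < 10)]
          by_cases hq : z.toNat / 10 = 0
          · have hq' : z / 10 = 0 := by omega
            rw [hq', pv_dig_zero]
            simp only [Nat.toDigitsCore, hq, List.map_cons, List.map_nil,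
              List.reverse_cons, List.reverse_nil, List.nil_append, hmod]
            rfl
          · have hq' : 0 < z / 10 := by omega
            have hstep : Nat.toDigitsCore 10 (g + 1) z.toNat acc =
                Nat.toDigitsCore 10 g (z.toNat / 10) (Nat.digitChar (z.toNat % 10) :: acc) := by
              simp only [Nat.toDigitsCore, hq]
              simp
            rw [hstep]
            have hglt : (z / 10).toNat < 10 ^ g := by
              rw [hdiv]
              rw [pow_succ] at hg
              omega
            have hflt : (z / 10).toNat < f := by
              have : z / 10 < z := pv_div_lt h0 (by norm_num)
              omega
            rw [← hdiv, ih (z / 10) f (Nat.digitChar (z.toNat % 10) :: acc) hq' hglt hflt]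
            simp [hmod, List.append_assoc]

theorem pv_flatten_singletons : ∀ (l : List Int), (∀ d ∈ l, 0 ≤ d ∧ d < 10) →
    (l.map PySem.Int.toChars).flatten = l.map (fun d => Nat.digitChar d.toNat) := by
  intro l
  induction l with
  | nil => simp
  | cons d t ih =>
      intro h
      obtain ⟨h0, h10⟩ := h d (by simp)
      simp only [List.map_cons, List.flatten_cons, pv_toChars_digit h0 h10,
        ih (fun x hx => h x (by simp [hx]))]
      rfl

theorem pv_seq_map {b : Int} : ∀ l : List Char,
    (∀ c ∈ l, pvDigit? c b = some (pvDV c)) →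
    pvSeq? (l.map (fun c => pvDigit? c b)) = some (l.map pvDV) := by
  intro l
  induction l with
  | nil => intro _; rfl
  | cons c t ih =>
      intro h
      rw [List.map_cons, h c (by simp)]
      simp only [pvSeq?, ih (fun x hx => h x (by simp [hx])), Option.map_some]
      rfl

-- the two match-bodies of the ports agree for any admissible sorted character list S
theorem pv_core (b : Int) (S : List Char) (k : Nat) (hb2 : 2 ≤ b) (hb36 : b ≤ 36)
    (hSne : S ≠ []) (hk : S.length = k)
    (hallS : ∀ c ∈ S, pvAllowed c b = true)
    (hpairS : S.Pairwise (· ≤ ·))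
    (hcaseS : (∀ c ∈ S, c.toNat < 97) ∨ (∀ c ∈ S, c.toNat < 65 ∨ 90 < c.toNat)) :
    (match pvParse? S.reverse b, pvParse? S b with
     | some x, some y => String.ofList (pvPadLoop k k (pvDecimalToBase |x - y| b))
     | _, _ => "") =
    (match pvSeq? (S.map (fun c => pvDigit? c b)) with
     | none => ""
     | some asc =>
         let out := (((pvStripTrailing (pvSubLoop (asc.zip asc.reverse) b 0 [])).map
                        PySem.Int.toChars).flatten).reverse
         String.ofList (List.replicate (k - out.length) '0' ++ out)) := by
  have hb0 : (0:Int) < b := by omega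
  have hdigS : ∀ c ∈ S, pvDigit? c b = some (pvDV c) :=
    fun c hc => pv_digit_eq hb2 hb36 (hallS c hc)
  have hSRne : S.reverse ≠ [] := by simpa using hSne
  have hdigSR : ∀ c ∈ S.reverse, pvDigit? c b = some (pvDV c) :=
    fun c hc => hdigS c (List.mem_reverse.mp hc)
  have hkpos : 0 < k := by
    rw [← hk]
    exact List.length_pos_of_ne_nil hSne
  -- digit values
  have hlenvals : (S.map pvDV).length = k := by simpa using hk
  have hbd : ∀ d ∈ S.map pvDV, 0 ≤ d ∧ d < b := by
    intro d hd
    obtain ⟨c, hc, rfl⟩ := List.mem_map.mp hd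
    exact pv_dv_bounds (hallS c hc)
  have hpairvals : (S.map pvDV).Pairwise (· ≤ ·) := by
    rw [List.pairwise_map]
    refine hpairS.imp_of_mem ?_
    intro a c ha hc hle
    refine pv_dv_mono (hallS a ha) (hallS c hc) ?_ (pv_char_le hle)
    rcases hcaseS with h | h
    · exact Or.inl ⟨h a ha, h c hc⟩
    · exact Or.inr ⟨h a ha, h c hc⟩
  -- parse results
  have hY : pvParse? S b = some (pvVM b (S.map pvDV) 0) := pv_parse_eq hSne hdigS
  have hX : pvParse? S.reverse b = some (pvVM b (S.map pvDV).reverse 0) := by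
    rw [pv_parse_eq hSRne hdigSR]
    rw [List.map_reverse]
  rw [hX, hY, pv_seq_map S hdigS]
  show String.ofList (pvPadLoop k k (pvDecimalToBase
        |pvVM b (S.map pvDV).reverse 0 - pvVM b (S.map pvDV) 0| b)) =
      String.ofList (List.replicate (k -
          ((((pvStripTrailing (pvSubLoop ((S.map pvDV).zip (S.map pvDV).reverse) b 0 [])).map
              PySem.Int.toChars).flatten).reverse).length) '0' ++
        (((pvStripTrailing (pvSubLoop ((S.map pvDV).zip (S.map pvDV).reverse) b 0 [])).map
            PySem.Int.toChars).flatten).reverse)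
  have hXL : pvVM b (S.map pvDV).reverse 0 = pvVL b (S.map pvDV) := by
    rw [pv_vM_eq_vL, List.reverse_reverse]
  have hYL : pvVM b (S.map pvDV) 0 = pvVL b (S.map pvDV).reverse := pv_vM_eq_vL b _
  have hYX : pvVL b (S.map pvDV).reverse ≤ pvVL b (S.map pvDV) :=
    pv_rev_le (by omega) _ hpairvals (fun d hd => (hbd d hd).1)
  have hXbound : pvVL b (S.map pvDV) < b ^ k := by
    have := (pv_vL_bounds hb0 _ hbd).2
    rwa [hlenvals] at this
  have hY0 : 0 ≤ pvVL b (S.map pvDV).reverse :=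
    (pv_vL_bounds hb0 _ (fun d hd => hbd d (List.mem_reverse.mp hd))).1
  have hzabs : |pvVM b (S.map pvDV).reverse 0 - pvVM b (S.map pvDV) 0| =
      pvVL b (S.map pvDV) - pvVL b (S.map pvDV).reverse := by
    rw [hXL, hYL]
    exact abs_of_nonneg (by omega)
  rw [hzabs]
  -- abbreviations for the rest
  set z := pvVL b (S.map pvDV) - pvVL b (S.map pvDV).reverse with hzdef
  have hz0 : 0 ≤ z := by omega
  have hzb : z < b ^ k := by
    have h1 := hXbound
    have h2 := hY0
    omega
  -- B's subtraction digits
  have hfst : (((S.map pvDV).zip (S.map pvDV).reverse).map Prod.fst) = S.map pvDV :=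
    List.map_fst_zip (by simp)
  have hsnd : (((S.map pvDV).zip (S.map pvDV).reverse).map Prod.snd) = (S.map pvDV).reverse :=
    List.map_snd_zip (by simp)
  have hlenpairs : ((S.map pvDV).zip (S.map pvDV).reverse).length = k := by
    simp [hlenvals]
  have hpairbd : ∀ p ∈ (S.map pvDV).zip (S.map pvDV).reverse,
      (0 ≤ p.1 ∧ p.1 < b) ∧ (0 ≤ p.2 ∧ p.2 < b) := by
    intro p hp
    obtain ⟨a, c⟩ := p
    obtain ⟨h1, h2⟩ := List.of_mem_zip hp
    exact ⟨hbd a h1, hbd c (List.mem_reverse.mp h2)⟩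
  obtain ⟨hlen_o, hbd_o, hbr_o, hval_o⟩ :=
    pv_subspec_spec hb0 ((S.map pvDV).zip (S.map pvDV).reverse) 0 le_rfl (by omega) hpairbd
  rw [hfst, hsnd, hlenpairs, sub_zero] at hval_o
  have hoB := pv_vL_bounds hb0 _ hbd_o
  rw [hlen_o, hlenpairs] at hoB
  have hfb0 : (pvSubSpec b ((S.map pvDV).zip (S.map pvDV).reverse) 0).2 = 0 := by
    rcases (show (pvSubSpec b ((S.map pvDV).zip (S.map pvDV).reverse) 0).2 = 0 ∨
        (pvSubSpec b ((S.map pvDV).zip (S.map pvDV).reverse) 0).2 = 1 by omega) with h | h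
    · exact h
    · exfalso
      rw [h, one_mul] at hval_o
      linarith
  rw [hfb0, zero_mul, add_zero] at hval_o
  -- hval_o : pvVL b o = z
  rw [pv_subloop_eq_spec]
  -- A's digit list
  have hD := pv_dig_spec hb2 (z.toNat + 1) z hz0 (by omega)
  have hstrip : pvStripTrailing (pvSubSpec b ((S.map pvDV).zip (S.map pvDV).reverse) 0).1 =
      pvStripTrailing (pvDig b (z.toNat + 1) z) :=
    pv_strip_unique hb0 _ _ hbd_o hD.2.1 (by rw [hval_o, hD.1])
  rcases eq_or_lt_of_le hz0 with hz | hzpos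
  · -- z = 0 : A pads "0", B pads the empty digit string
    rw [hstrip]
    rw [pv_strip_zero hb0 _ hD.2.1 (by rw [hD.1, ← hz])]
    have hA0 : pvDecimalToBase z b = ['0'] := by
      rw [← hz]
      simp [pvDecimalToBase]
      rfl
    rw [hA0, pv_pad_eq k k ['0'] (by omega)]
    simp only [List.map_nil, List.flatten_nil, List.reverse_nil, List.length_nil,
      List.append_nil, List.length_cons, Nat.sub_zero, Nat.zero_add]
    congr 1
    rw [← List.replicate_succ']
    congr 1
    omega
  · -- z > 0
    have hDs : pvStripTrailing (pvDig b (z.toNat + 1) z) = pvDig b (z.toNat + 1) z :=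
      pv_dig_stripped hb2 (z.toNat + 1) z hzpos (by omega)
    rw [hstrip, hDs]
    by_cases hb10 : b = 10
    · subst hb10
      have hflat : ((pvDig 10 (z.toNat + 1) z).map PySem.Int.toChars).flatten =
          (pvDig 10 (z.toNat + 1) z).map (fun d => Nat.digitChar d.toNat) :=
        pv_flatten_singletons _ hD.2.1
      have hpow : z.toNat < 10 ^ (z.toNat + 1) :=
        lt_of_lt_of_le (Nat.lt_pow_self (by norm_num))
          (Nat.pow_le_pow_right (by norm_num) (by omega))
      have hAch : pvDecimalToBase z 10 =
          (((pvDig 10 (z.toNat + 1) z).map PySem.Int.toChars).flatten).reverse := by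
        rw [pvDecimalToBase, if_pos (Or.inl rfl), pv_toChars_nonneg hz0]
        rw [show Nat.toDigits 10 z.toNat = Nat.toDigitsCore 10 (z.toNat + 1) z.toNat [] from rfl]
        rw [pv_toDigitsCore_eq (z.toNat + 1) z (z.toNat + 1) [] hzpos hpow (by omega)]
        rw [hflat]
        simp
      rw [hAch, pv_pad_eq k k _ (by omega)]
    · have hAch : pvDecimalToBase z b =
          (((pvDig b (z.toNat + 1) z).map PySem.Int.toChars).flatten).reverse := by
        rw [pvDecimalToBase, if_neg (by simp; exact ⟨hb10, by omega⟩)]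
        rw [pv_d2b_flatten b (z.toNat + 1) z []]
        simp
      rw [hAch, pv_pad_eq k k _ (by omega)]

-- ===== VERDICT (by name: the statement is the Claim_ definition above) =====
theorem lambda_algorithm_spec : Claim_equal_lambda_algorithm := by
  intro n b _ hpre
  obtain ⟨hne, hb2, hb36, hallB, hcaseB⟩ := hpre
  have hall : ∀ c ∈ n.toList, pvAllowed c b = true := by simpa using hallB
  have hcase : (∀ c ∈ n.toList, c.toNat < 97) ∨
      (∀ c ∈ n.toList, c.toNat < 65 ∨ 90 < c.toNat) := by
    rcases hcaseB with h | h
    · exact Or.inl (by simpa using h)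
    · exact Or.inr (by simpa using h)
  unfold Spec_lambda_algorithm
  have hperm : (PySem.List.sorted n.toList (fun c => c) false).Perm n.toList :=
    PySem.List.sorted_perm n.toList (fun c => c) false
  have hmemS : ∀ c ∈ PySem.List.sorted n.toList (fun c => c) false, c ∈ n.toList :=
    fun c hc => hperm.mem_iff.mp hc
  have hSne : PySem.List.sorted n.toList (fun c => c) false ≠ [] := by
    intro h
    apply hne
    have h2 := hperm.symm
    rw [h] at h2
    exact List.perm_nil.mp h2
  have hcore := pv_core b (PySem.List.sorted n.toList (fun c => c) false) n.toList.length
    hb2 hb36 hSne hperm.length_eq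
    (fun c hc => hall c (hmemS c hc))
    (PySem.List.sorted_pairwise n.toList (fun c => c))
    (by
      rcases hcase with h | h
      · exact Or.inl (fun c hc => h c (hmemS c hc))
      · exact Or.inr (fun c hc => h c (hmemS c hc)))
  exact hcore
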